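-- pv_equiv track=rewrite | github.com/Frey210/feeder_fuzzy | feeder-research/python/logger/data_logger.py | _ordered_fields
-- ===== SOURCE A (Python) =====
-- from typing import Dict, Iterable, List, Optional, Sequence
--
-- def _ordered_fields(records: Sequence[Dict]) -> List[str]:
--     preferred = [
--         "timestamp",
--         "temp",
--         "distance_mm",
--         "feed_estimate_g",
--         "biomass",
--         "fuzzy_output_g",
--         "real_output_g_values",
--         "real_output_g_count",
--         "real_output_g_mean",
--         "real_output_g_std",
--         "real_output_g_min",
--         "real_output_g_max",
--         "abs_error_g",
--         "pct_error",
--         "signed_error_g",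
--         "pwm",
--         "duration_s",
--         "mode",
--         "state",
--         "event",
--         "sim_mode",
--     ]
--     discovered = []
--     for record in records:
--         for key in record.keys():
--             if key not in discovered and key not in preferred:
--                 discovered.append(key)
--     return [field for field in preferred if any(field in record for record in records)] + discovered
-- ===== SOURCE B (Python) =====
-- def _ordered_fields(records):
--     preferred = [
--         "timestamp",
--         "temp",
--         "distance_mm",
--         "feed_estimate_g",
--         "biomass",
--         "fuzzy_output_g",
--         "real_output_g_values",
--         "real_output_g_count",
--         "real_output_g_mean",
--         "real_output_g_std",
--         "real_output_g_min",
--         "real_output_g_max",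
--         "abs_error_g",
--         "pct_error",
--         "signed_error_g",
--         "pwm",
--         "duration_s",
--         "mode",
--         "state",
--         "event",
--         "sim_mode",
--     ]
--     # One pass: ordered union of all keys, then two filtered partitions.
--     all_keys = list(dict.fromkeys(k for record in records for k in record))
--     present = set(all_keys)
--     pset = set(preferred)
--     return [f for f in preferred if f in present] + [k for k in all_keys if k not in pset]
-- ===== Notes on version B (the rewrite author's own statement) =====
-- stated objective: faster
-- what changed: B builds the ordered union of all keys once with dict.fromkeys and then partitions it against the static preferred list, replacing A's per-key rescans of the discovered list and the per-preferred-field rescan of every record.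
import Mathlib
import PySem

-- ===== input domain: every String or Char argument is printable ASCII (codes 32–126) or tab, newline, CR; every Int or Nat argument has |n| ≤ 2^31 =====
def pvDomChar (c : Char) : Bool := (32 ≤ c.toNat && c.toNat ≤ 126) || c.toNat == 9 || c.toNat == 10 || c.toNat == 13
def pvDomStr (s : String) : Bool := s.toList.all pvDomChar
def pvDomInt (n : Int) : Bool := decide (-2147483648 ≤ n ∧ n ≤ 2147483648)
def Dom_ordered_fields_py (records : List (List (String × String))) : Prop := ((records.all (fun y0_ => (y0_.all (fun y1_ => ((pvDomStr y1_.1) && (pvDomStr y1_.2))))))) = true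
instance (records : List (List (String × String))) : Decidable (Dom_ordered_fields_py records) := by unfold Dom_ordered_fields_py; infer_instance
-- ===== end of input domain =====

-- B builds the ordered union of all keys once, then partitions it against the static
-- preferred list; A rescans the discovered list per key and every record per preferred field.

-- the static preferred field list (shared literal data of both programs)
def pvPreferred : List String :=
  ["timestamp", "temp", "distance_mm", "feed_estimate_g", "biomass", "fuzzy_output_g",
   "real_output_g_values", "real_output_g_count", "real_output_g_mean", "real_output_g_std",
   "real_output_g_min", "real_output_g_max", "abs_error_g", "pct_error", "signed_error_g",
   "pwm", "duration_s", "mode", "state", "event", "sim_mode"]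

-- record.keys(): a Python dict's keys are the FIRST occurrences, in order (exact for the assoc-list encoding)
def pvKeys (record : List (String × String)) : List String :=
  PySem.List.dedup (record.map Prod.fst)

-- ===== PORT A =====
def ordered_fields_py (records : List (List (String × String))) : List String :=
  let preferred := pvPreferred
  let discovered := records.foldl (fun disc record =>
    (pvKeys record).foldl (fun disc key =>
      if key ∉ disc ∧ key ∉ preferred then disc ++ [key] else disc) disc) []
  (preferred.filter (fun field => records.any (fun record => (pvKeys record).contains field))) ++ discovered

-- ===== PORT B =====
def ordered_fields_py_alt (records : List (List (String × String))) : List String :=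
  let preferred := pvPreferred
  let all_keys := PySem.List.dedup (records.flatMap (fun record => pvKeys record))
  let present := PySem.Set.ofList all_keys
  let pset := PySem.Set.ofList preferred
  (preferred.filter (fun f => PySem.Set.contains present f)) ++
    (all_keys.filter (fun k => !(PySem.Set.contains pset k)))

-- ===== PRECONDITION & SPEC =====
def Spec_ordered_fields_py (records : List (List (String × String))) (out : List String) : Prop := out = ordered_fields_py_alt records
instance (records : List (List (String × String))) (out : List String) : Decidable (Spec_ordered_fields_py records out) := by unfold Spec_ordered_fields_py; infer_instance

-- ===== CLAIM (what is proved, stated in full; the proofs are below) =====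
def Claim_equal_ordered_fields_py : Prop := ∀ (records : List (List (String × String))), Dom_ordered_fields_py records → Spec_ordered_fields_py records (ordered_fields_py records)

-- ===== LEMMAS AND PROOFS =====

-- A's nested loop over records/keys is the loop over the flattened key list
lemma foldl_keys_flatMap (f : List String → String → List String) :
    ∀ (rs : List (List (String × String))) (d : List String),
      rs.foldl (fun d r => (pvKeys r).foldl f d) d = (rs.flatMap (fun r => pvKeys r)).foldl f d := by
  intro rs
  induction rs with
  | nil => intro d; rfl
  | cons r rs ih =>
    intro d
    simp [List.foldl_append, ih]

-- A's conditional-append loop computes the pref-free part of the ordered union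
lemma discovered_eq_filter (pref : List String) :
    ∀ (ks : List String) (s d : List String),
      d = s.filter (fun k => decide (k ∉ pref)) →
      ks.foldl (fun disc key => if key ∉ disc ∧ key ∉ pref then disc ++ [key] else disc) d
        = (ks.foldl PySem.Set.add s).filter (fun k => decide (k ∉ pref)) := by
  intro ks
  induction ks with
  | nil => intro s d h; simpa using h
  | cons k ks ih =>
    intro s d h
    simp only [List.foldl_cons]
    by_cases hp : k ∈ pref
    · rw [if_neg (by simp [hp])]
      by_cases hs : k ∈ s
      · rw [show PySem.Set.add s k = s by simp [PySem.Set.add, hs]]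
        exact ih s d h
      · rw [show PySem.Set.add s k = s ++ [k] by simp [PySem.Set.add, hs]]
        apply ih
        simp [List.filter_append, h, hp]
    · by_cases hs : k ∈ s
      · have hd : k ∈ d := by subst h; simp [List.mem_filter, hs, hp]
        rw [if_neg (by simp [hd]), show PySem.Set.add s k = s by simp [PySem.Set.add, hs]]
        exact ih s d h
      · have hd : k ∉ d := by subst h; simp [List.mem_filter, hs]
        rw [if_pos ⟨hd, hp⟩, show PySem.Set.add s k = s ++ [k] by simp [PySem.Set.add, hs]]
        apply ih
        simp [List.filter_append, h, hp]

-- ===== VERDICT (by name: the statement is the Claim_ definition above) =====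
theorem ordered_fields_py_spec : Claim_equal_ordered_fields_py := by
  intro records _
  unfold Spec_ordered_fields_py ordered_fields_py ordered_fields_py_alt
  simp only []
  congr 1
  · -- preferred parts: presence in some record = presence in the union
    apply List.filter_congr
    intro f _
    rw [Bool.eq_iff_iff]
    simp only [List.any_eq_true, decide_eq_true_eq, List.contains_iff_mem, PySem.Set.contains_iff, PySem.Set.mem_ofList,
      PySem.List.mem_dedup, List.mem_flatMap]
  · -- discovered = union filtered by "not preferred"
    rw [foldl_keys_flatMap, discovered_eq_filter pvPreferred _ [] [] (by simp)]
    rw [show (records.flatMap (fun r => pvKeys r)).foldl PySem.Set.add []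
          = PySem.Set.ofList (records.flatMap (fun r => pvKeys r)) from
        (PySem.Set.ofList_eq_foldl _).symm]
    rw [show PySem.List.dedup (records.flatMap (fun r => pvKeys r))
          = PySem.Set.ofList (records.flatMap (fun r => pvKeys r)) from
        PySem.List.dedup_eq_ofList _]
    apply List.filter_congr
    intro k _
    simp [PySem.Set.contains, PySem.Set.mem_ofList]
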